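-- pv_equiv track=rewrite | github.com/yuheesong/Programmers-Algorithm | Lv2/귤 고르기.py | solution
-- ===== SOURCE A (Python) =====
-- def solution(k, tangerine):
--     d={}
--     cnt=0
--     for i in tangerine:
--         if i in d:
--             d[i]+=1
--         else:
--             d[i]=1
--     d = dict(sorted(d.items(), key=lambda x: x[1], reverse=True))
--     for i in d:
--         if d[i]>=k:
--             cnt+=1
--             return cnt
--         else:
--             k-=d[i]
--             cnt+=1
-- ===== SOURCE B (Python) =====
-- def solution(k, tangerine):
--     freq = {}
--     for x in tangerine:
--         freq[x] = freq.get(x, 0) + 1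
--     n = len(tangerine)
--     bucket = [0] * (n + 1)
--     for c in freq.values():
--         bucket[c] += 1
--     cnt = 0
--     for c in range(n, 0, -1):
--         for _ in range(bucket[c]):
--             cnt += 1
--             if c >= k:
--                 return cnt
--             k -= c
-- ===== Notes on version B (the rewrite author's own statement) =====
-- stated objective: alternative
-- what changed: B replaces A's comparison sort of the frequency table by a counting-sort bucket array over frequencies 1..n scanned from the largest frequency down (asymptotically O(n) vs O(n log n), though the Python a timing run measured only ~1.25x at the largest size, so no speed is claimed).
-- outside the precondition, e.g. on solution(5, [1]): A returns None, B returns None; on solution(1, []): A returns None, B returns None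
import Mathlib
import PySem

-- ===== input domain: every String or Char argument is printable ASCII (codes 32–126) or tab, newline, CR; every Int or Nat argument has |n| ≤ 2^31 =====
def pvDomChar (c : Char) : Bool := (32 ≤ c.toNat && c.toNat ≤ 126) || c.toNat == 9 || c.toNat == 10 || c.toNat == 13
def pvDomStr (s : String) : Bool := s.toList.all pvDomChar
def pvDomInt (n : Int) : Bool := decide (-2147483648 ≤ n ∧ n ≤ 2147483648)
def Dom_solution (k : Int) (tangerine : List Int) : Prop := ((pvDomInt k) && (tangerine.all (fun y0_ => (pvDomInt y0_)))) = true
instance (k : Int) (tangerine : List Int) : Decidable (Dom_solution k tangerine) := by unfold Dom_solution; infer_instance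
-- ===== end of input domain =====

-- B replaces A's comparison sort of the frequency table with a counting-sort bucket array over
-- frequencies 1..n scanned from the largest frequency down (objective: alternative algorithm).

-- ===== PORT A =====
-- the second loop of A ('for i in d: if d[i]>=k: … return cnt'); none = falling off the loop (Python returns None there)
def solutionLoopA (d : PySem.Dict Int Int) (k cnt : Int) : List Int → Option Int
  | [] => none
  | i :: rest =>
    if d.getD i 0 ≥ k then some (cnt + 1)
    else solutionLoopA d (k - d.getD i 0) (cnt + 1) rest

def solution (k : Int) (tangerine : List Int) : Int :=
  let d := tangerine.foldl
    (fun d i => if d.contains i then d.modify i 0 (· + 1) else d.insert i 1) PySem.Dict.empty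
  let d2 := PySem.Dict.ofList (PySem.List.sorted d.items (fun x => x.2) true)
  (solutionLoopA d2 k 0 d2.keys).getD 0   -- .getD 0 only packs the Option; Pre_ excludes the none case

-- ===== PORT B =====
-- inner 'for _ in range(bucket[c])' loop: either an early return (.inl cnt) or the new state (.inr (k, cnt))
def solutionInnerB (c : Int) (k cnt : Int) : Nat → Sum Int (Int × Int)
  | 0 => .inr (k, cnt)
  | m + 1 => if c ≥ k then .inl (cnt + 1) else solutionInnerB c (k - c) (cnt + 1) m

-- outer 'for c in range(n, 0, -1)' loop of B
def solutionLoopB (bucket : List Int) (k cnt : Int) : List Int → Option Int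
  | [] => none
  | c :: rest =>
    match solutionInnerB c k cnt (PySem.List.pyGetD bucket c 0).toNat with
    | .inl r => some r
    | .inr (k', cnt') => solutionLoopB bucket k' cnt' rest

def solution_alt (k : Int) (tangerine : List Int) : Int :=
  let freq := tangerine.foldl (fun d x => d.insert x (d.getD x 0 + 1)) PySem.Dict.empty
  let n : Int := tangerine.length
  let bucket := freq.values.foldl
    (fun b c => PySem.List.pySetD b c (PySem.List.pyGetD b c 0 + 1))
    (List.replicate (n + 1).toNat (0 : Int))
  (solutionLoopB bucket k 0 (PySem.List.pyRange n 0 (-1))).getD 0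

-- ===== PRECONDITION & SPEC =====
-- Pre_ excludes exactly the inputs (empty list, or k > len(tangerine)) on which A's second loop
-- falls through and the Python returns None instead of an int.
def Pre_solution (k : Int) (tangerine : List Int) : Prop :=
  tangerine ≠ [] ∧ k ≤ (tangerine.length : Int)
instance (k : Int) (tangerine : List Int) : Decidable (Pre_solution k tangerine) := by
  unfold Pre_solution; infer_instance

def pvWitness_solution : Int × List Int := (2, [1, 1, 2])

def Spec_solution (k : Int) (tangerine : List Int) (out : Int) : Prop := out = solution_alt k tangerine
instance (k : Int) (tangerine : List Int) (out : Int) : Decidable (Spec_solution k tangerine out) := by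
  unfold Spec_solution; infer_instance

-- ===== CLAIM (what is proved, stated in full; the proofs are below) =====
def Claim_equal_solution : Prop := ∀ (k : Int) (tangerine : List Int), Dom_solution k tangerine → Pre_solution k tangerine → Spec_solution k tangerine (solution k tangerine)

-- ===== LEMMAS AND PROOFS =====

-- the common core of both loops: walk a list of counts, return (cnt+1) at the first count ≥ k
def runCnt (k cnt : Int) : List Int → Option Int
  | [] => none
  | c :: cs => if c ≥ k then some (cnt + 1) else runCnt (k - c) (cnt + 1) cs

-- A's counting dict IS Counter(tangerine)
lemma dictA_eq_counter (t : List Int) :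
    t.foldl (fun d i => if d.contains i then d.modify i 0 (· + 1) else d.insert i 1)
      PySem.Dict.empty = PySem.Dict.counter t := by
  have hf : (fun (d : PySem.Dict Int Int) i => if d.contains i then d.modify i 0 (· + 1) else d.insert i 1)
      = (fun d x => d.modify x 0 (· + 1)) := by
    funext d i
    by_cases h : d.contains i
    · simp [h]
    · simp [h, PySem.Dict.modify, PySem.Dict.getD_of_not_contains d 0 (by simpa using h)]
  rw [hf, PySem.Dict.counter_eq_foldl]

-- A's loop over the keys of a dict it looks entries up in = runCnt over the values
lemma loopA_eq_runCnt (d : PySem.Dict Int Int) (T : List (Int × Int))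
    (h : ∀ p ∈ T, d.getD p.1 0 = p.2) (k cnt : Int) :
    solutionLoopA d k cnt (T.map Prod.fst) = runCnt k cnt (T.map Prod.snd) := by
  induction T generalizing k cnt with
  | nil => rfl
  | cons p T ih =>
    have hp := h p (List.mem_cons_self ..)
    simp only [List.map_cons, solutionLoopA, runCnt, hp]
    by_cases hge : p.2 ≥ k <;>
      simp [hge, ih (fun q hq => h q (List.mem_cons_of_mem _ hq))]

-- B's inner fuel loop, seen through runCnt
lemma runCnt_replicate (c k cnt : Int) (m : Nat) (rest : List Int) :
    runCnt k cnt (List.replicate m c ++ rest) =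
      match solutionInnerB c k cnt m with
      | .inl r => some r
      | .inr (k', cnt') => runCnt k' cnt' rest := by
  induction m generalizing k cnt with
  | zero => rfl
  | succ m ih =>
    simp only [List.replicate_succ, List.cons_append, runCnt, solutionInnerB]
    by_cases hge : c ≥ k <;> simp [hge, ih]

-- B's two nested loops = runCnt over the concatenation of the bucket blocks
lemma loopB_eq_runCnt (bucket : List Int) (cs : List Int) (k cnt : Int) :
    solutionLoopB bucket k cnt cs =
      runCnt k cnt (cs.flatMap (fun c => List.replicate (PySem.List.pyGetD bucket c 0).toNat c)) := by
  induction cs generalizing k cnt with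
  | nil => rfl
  | cons c cs ih =>
    simp only [List.flatMap_cons, solutionLoopB, runCnt_replicate]
    cases hin : solutionInnerB c k cnt (PySem.List.pyGetD bucket c 0).toNat with
    | inl r => rfl
    | inr p => cases p; simp [ih]

-- reading a written cell at in-range Int indices
lemma pyGetD_pySetD_int (b : List Int) (x c v : Int) (hx0 : 0 ≤ x)
    (hc0 : 0 ≤ c) (hc : c < (b.length : Int)) :
    PySem.List.pyGetD (PySem.List.pySetD b x v) c 0 = if c = x then v else PySem.List.pyGetD b c 0 := by
  rw [PySem.List.pySetD_of_nonneg b v hx0]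
  rw [PySem.List.pyGetD_eq_getElem _ _ hc0 (by simpa using hc),
      PySem.List.pyGetD_eq_getElem _ _ hc0 hc]
  rw [List.getElem_set]
  by_cases hcx : c = x
  · simp [hcx]
  · have : x.toNat ≠ c.toNat := by omega
    simp [this, hcx]

-- the bucket array counts the frequencies
lemma bucket_count (l : List Int) (b : List Int) (n : Int)
    (hb : (b.length : Int) = n + 1) (hl : ∀ x ∈ l, 1 ≤ x ∧ x ≤ n)
    (c : Int) (hc0 : 0 ≤ c) (hc : c ≤ n) :
    PySem.List.pyGetD
      (l.foldl (fun b c => PySem.List.pySetD b c (PySem.List.pyGetD b c 0 + 1)) b) c 0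
      = PySem.List.pyGetD b c 0 + (l.count c : Int) := by
  induction l generalizing b with
  | nil => simp
  | cons x l ih =>
    have hx := hl x (List.mem_cons_self ..)
    have hlen : ((PySem.List.pySetD b x (PySem.List.pyGetD b x 0 + 1)).length : Int) = n + 1 := by
      rw [PySem.List.pySetD_of_nonneg b _ (by omega)]; simpa using hb
    rw [List.foldl_cons, ih _ hlen (fun y hy => hl y (List.mem_cons_of_mem _ hy)),
        pyGetD_pySetD_int b x c _ (by omega) hc0 (by omega),
        List.count_cons]
    by_cases hcx : c = x
    · subst hcx; simp; ring
    · have hxc : ¬ (x = c) := fun h => hcx h.symm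
      simp [hcx, hxc]

lemma count_flatMap_replicate (cs : List Int) (m : Int → Nat) (hnd : cs.Nodup) (x : Int) :
    (cs.flatMap (fun c => List.replicate (m c) c)).count x = if x ∈ cs then m x else 0 := by
  induction cs with
  | nil => simp
  | cons c cs ih =>
    have hnotin : c ∉ cs := (List.nodup_cons.mp hnd).1
    rw [List.flatMap_cons, List.count_append, List.count_replicate,
        ih (List.nodup_cons.mp hnd).2]
    by_cases hxc : x = c
    · subst hxc; simp [hnotin]
    · simp [hxc]
      exact fun h => absurd h.symm hxc

lemma pairwise_flatMap_replicate (cs : List Int) (m : Int → Nat) (h : cs.Pairwise (· > ·)) :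
    (cs.flatMap (fun c => List.replicate (m c) c)).Pairwise (· ≥ ·) := by
  induction cs with
  | nil => simp
  | cons c cs ih =>
    rw [List.pairwise_cons] at h
    rw [List.flatMap_cons, List.pairwise_append]
    refine ⟨List.pairwise_replicate.mpr (Or.inr le_rfl), ih h.2, ?_⟩
    intro a ha b hb
    rcases List.mem_flatMap.mp hb with ⟨c', hc', hb'⟩
    rw [List.eq_of_mem_replicate ha, List.eq_of_mem_replicate hb']
    exact (h.1 c' hc').le

-- A's whole body, reduced to runCnt over the sorted count list
lemma solutionA_eq (k : Int) (t : List Int) :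
    solution k t =
      (runCnt k 0 ((PySem.List.sorted (PySem.Dict.counter t).items (fun x => x.2) true).map
        (fun p => p.2))).getD 0 := by
  unfold solution
  rw [dictA_eq_counter]
  set S := PySem.List.sorted (PySem.Dict.counter t).items (fun x => x.2) true with hS
  have hSperm : S.Perm (PySem.Dict.counter t).items := PySem.List.sorted_perm _ _ _
  have h0 : (List.map (fun p => p.1) (PySem.Dict.counter t).items).Nodup :=
    PySem.Dict.nodup_keys_counter t
  have hfstnodup : (S.map (fun p => p.1)).Nodup :=
    ((hSperm.map (fun p => p.1)).nodup_iff).mpr h0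
  have hitems : (PySem.Dict.ofList S).items = S := by
    show (S.foldl (fun acc p => acc.insert p.1 p.2) PySem.Dict.empty).items = S
    rw [PySem.Dict.items_foldl_insert_fresh S (fun p => p.1) (fun p => p.2) _ (by simp) hfstnodup]
    show PySem.Dict.empty.items ++ _ = _
    rw [show PySem.Dict.empty.items = ([] : List (Int × Int)) from rfl]
    simp
  have hkeys : (PySem.Dict.ofList S).keys = S.map (fun p => p.1) := by
    show (PySem.Dict.ofList S).items.map (fun p => p.1) = _
    rw [hitems]
  have hget : ∀ p ∈ S, (PySem.Dict.ofList S).getD p.1 0 = p.2 := by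
    intro p hp
    exact PySem.Dict.getD_of_mem_items _ (by rw [hitems]; simpa using hp)
      (by rw [hkeys]; exact hfstnodup) 0
  show (solutionLoopA (PySem.Dict.ofList S) k 0 (PySem.Dict.ofList S).keys).getD 0 = _
  rw [hkeys]
  rw [loopA_eq_runCnt (PySem.Dict.ofList S) S hget k 0]

-- B's whole body, reduced to runCnt over the bucket blocks
lemma solutionB_eq (k : Int) (t : List Int) :
    solution_alt k t =
      (runCnt k 0 ((PySem.List.pyRange (t.length : Int) 0 (-1)).flatMap
        (fun c => List.replicate
          (PySem.List.pyGetD ((PySem.Dict.counter t).values.foldl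
            (fun b c => PySem.List.pySetD b c (PySem.List.pyGetD b c 0 + 1))
            (List.replicate ((t.length : Int) + 1).toNat (0 : Int))) c 0).toNat c))).getD 0 := by
  unfold solution_alt
  rw [PySem.Dict.foldl_insert_getD_add_one_eq_counter]
  show (solutionLoopB ((PySem.Dict.counter t).values.foldl
      (fun b c => PySem.List.pySetD b c (PySem.List.pyGetD b c 0 + 1))
      (List.replicate ((t.length : Int) + 1).toNat (0 : Int))) k 0
      (PySem.List.pyRange (t.length : Int) 0 (-1))).getD 0 = _
  rw [loopB_eq_runCnt]

-- the two count lists coincide: both are the frequency multiset sorted in descending order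
lemma lists_eq (t : List Int) :
    (PySem.List.sorted (PySem.Dict.counter t).items (fun x => x.2) true).map (fun p => p.2) =
      (PySem.List.pyRange (t.length : Int) 0 (-1)).flatMap
        (fun c => List.replicate
          (PySem.List.pyGetD ((PySem.Dict.counter t).values.foldl
            (fun b c => PySem.List.pySetD b c (PySem.List.pyGetD b c 0 + 1))
            (List.replicate ((t.length : Int) + 1).toNat (0 : Int))) c 0).toNat c) := by
  set n := (t.length : Int) with hn
  set vs := (PySem.Dict.counter t).values with hvsdef
  have hvs_eq : vs = (PySem.Dict.counter t).items.map (fun p => p.2) := rfl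
  have hvals : ∀ x ∈ vs, 1 ≤ x ∧ x ≤ n := by
    rw [hvs_eq, PySem.Dict.items_counter]
    intro x hx
    simp only [List.map_map, Function.comp, List.mem_map] at hx
    obtain ⟨kk, hk, rfl⟩ := hx
    have hkt : kk ∈ t := (PySem.Set.mem_ofList t kk).mp hk
    have h1 : 0 < t.count kk := List.count_pos_iff.mpr hkt
    have h2 : t.count kk ≤ t.length := List.count_le_length
    constructor
    · omega
    · omega
  set base := List.replicate (n + 1).toNat (0 : Int) with hbase
  have hbulen : ((base.length : Int)) = n + 1 := by
    simp [hbase, List.length_replicate]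
    omega
  set bucket := vs.foldl (fun b c => PySem.List.pySetD b c (PySem.List.pyGetD b c 0 + 1)) base
    with hbucketdef
  have hbucket : ∀ c : Int, 0 ≤ c → c ≤ n → PySem.List.pyGetD bucket c 0 = (vs.count c : Int) := by
    intro c hc0 hc
    rw [hbucketdef, bucket_count vs base n hbulen hvals c hc0 hc,
        PySem.List.pyGetD_eq_getElem _ _ hc0 (by rw [hbulen]; omega)]
    simp [hbase]
  have hpw : (PySem.List.pyRange n 0 (-1)).Pairwise (· > ·) := by
    rw [PySem.List.pyRange_neg_one, List.pairwise_map]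
    exact (List.pairwise_lt_range).imp (fun h => by omega)
  have hnd : (PySem.List.pyRange n 0 (-1)).Nodup := hpw.imp ne_of_gt
  have hperm : ((PySem.List.pyRange n 0 (-1)).flatMap
      (fun c => List.replicate ((PySem.List.pyGetD bucket c 0).toNat) c)).Perm vs := by
    rw [List.perm_iff_count]
    intro x
    rw [count_flatMap_replicate _ _ hnd x]
    by_cases hin : x ∈ PySem.List.pyRange n 0 (-1)
    · obtain ⟨h1, h2⟩ := PySem.List.mem_pyRange_neg_one.mp hin
      rw [if_pos hin, hbucket x (by omega) h2]
      simp
    · rw [if_neg hin]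
      have hxnot : x ∉ vs := fun hx =>
        hin (PySem.List.mem_pyRange_neg_one.mpr ⟨by have := (hvals x hx).1; omega, (hvals x hx).2⟩)
      exact (List.count_eq_zero.mpr hxnot).symm
  set S := PySem.List.sorted (PySem.Dict.counter t).items (fun x => x.2) true with hSdef
  have hSperm : (S.map (fun p => p.2)).Perm vs := by
    rw [hvs_eq]
    exact (PySem.List.sorted_perm _ _ _).map _
  have hSsorted : (S.map (fun p => p.2)).Pairwise (· ≥ ·) := by
    rw [List.pairwise_map]
    exact PySem.List.sorted_pairwise_rev _ _
  have hLsorted := pairwise_flatMap_replicate (PySem.List.pyRange n 0 (-1))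
    (fun c => (PySem.List.pyGetD bucket c 0).toNat) hpw
  exact List.Perm.eq_of_pairwise (fun a b _ _ h1 h2 => le_antisymm h2 h1)
    hSsorted hLsorted (hSperm.trans hperm.symm)

-- ===== VERDICT (by name: the statement is the Claim_ definition above) =====
theorem solution_spec : Claim_equal_solution := by
  intro k t _ _
  unfold Spec_solution
  rw [solutionA_eq, solutionB_eq, lists_eq]
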